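-- pv_equiv track=rewrite | github.com/AliZagham1/codepath-tip103-python | problems/week01/tiggerfy.py | tiggerfy
-- ===== SOURCE A (Python) =====
-- def tiggerfy(word):
--     result = ""
--     i = 0
--
--     while i < len(word):
--         current_char = word[i].lower()
--         next_two_chars = word[i:i+2].lower()
--
--         # Remove multi-character patterns first
--         if next_two_chars == "gg" or next_two_chars == "er":
--             i += 2
--
--         # Remove single characters
--         elif current_char == "t" or current_char == "i":
--             i += 1
--
--         # Keep everything else
--         else:
--             result += word[i]
--             i += 1
--
--     return result
-- ===== SOURCE B (Python) =====
-- def tiggerfy(word):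
--     # One pass with a one-character pending buffer instead of index arithmetic and slicing.
--     out = []
--     pending = None
--     for c in word:
--         if pending is None:
--             pending = c
--         elif (pending + c).lower() in ("gg", "er"):
--             pending = None
--         else:
--             if pending.lower() not in ("t", "i"):
--                 out.append(pending)
--             pending = c
--     if pending is not None and pending.lower() not in ("t", "i"):
--         out.append(pending)
--     return "".join(out)
-- ===== Notes on version B (the rewrite author's own statement) =====
-- stated objective: faster
-- what changed: Replaces A's index-driven while loop with slicing and quadratic repeated string concatenation by a single left-to-right pass keeping a one-character pending buffer, collecting kept characters in a list joined once at the end.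
import Mathlib
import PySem

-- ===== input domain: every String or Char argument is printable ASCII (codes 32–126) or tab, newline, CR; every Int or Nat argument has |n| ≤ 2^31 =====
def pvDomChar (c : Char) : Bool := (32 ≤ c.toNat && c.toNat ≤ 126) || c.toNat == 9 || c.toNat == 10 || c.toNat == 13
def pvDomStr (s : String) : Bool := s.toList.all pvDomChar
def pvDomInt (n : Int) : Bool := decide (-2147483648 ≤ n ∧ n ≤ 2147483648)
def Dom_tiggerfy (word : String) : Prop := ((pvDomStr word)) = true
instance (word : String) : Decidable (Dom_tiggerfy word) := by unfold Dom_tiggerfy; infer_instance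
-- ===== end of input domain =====

-- B replaces A's index/slice while-loop and repeated string concatenation by a one-pass scan with a one-character pending buffer, joining the kept characters once (measured faster).

-- ===== PORT A =====
-- A's while loop over index i, accumulating `result`; word[i:i+2].lower() and word[i].lower() as in the Python.
def tiggerfyGo (cs : List Char) (i : Nat) (result : List Char) : List Char :=
  if h : i < cs.length then
    let currentChar := PySem.Chars.lowerChar cs[i]
    let nextTwoChars := PySem.Chars.lower (PySem.List.slice cs (some (i : Int)) (some ((i + 2 : Nat) : Int)))
    if nextTwoChars = ['g', 'g'] ∨ nextTwoChars = ['e', 'r'] then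
      tiggerfyGo cs (i + 2) result
    else if currentChar = 't' ∨ currentChar = 'i' then
      tiggerfyGo cs (i + 1) result
    else
      tiggerfyGo cs (i + 1) (result ++ [cs[i]])
  else result
termination_by cs.length - i

def tiggerfy (word : String) : String := String.ofList (tiggerfyGo word.toList 0 [])

-- ===== PORT B =====
-- Source B's loop: pending : Option Char, out accumulator; tail flush after the loop.
def tigPair (p c : Char) : Bool :=
  decide (PySem.Chars.lower [p, c] = ['g', 'g'] ∨ PySem.Chars.lower [p, c] = ['e', 'r'])

def tigSingle (p : Char) : Bool :=
  decide (PySem.Chars.lowerChar p = 't' ∨ PySem.Chars.lowerChar p = 'i')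

def tiggerfyAltGo : List Char → Option Char → List Char → List Char
  | [], none, out => out
  | [], some p, out => if tigSingle p then out else out ++ [p]
  | c :: l, none, out => tiggerfyAltGo l (some c) out
  | c :: l, some p, out =>
    if tigPair p c then tiggerfyAltGo l none out
    else tiggerfyAltGo l (some c) (if tigSingle p then out else out ++ [p])

def tiggerfy_alt (word : String) : String := String.ofList (tiggerfyAltGo word.toList none [])

-- ===== PRECONDITION & SPEC =====
def Spec_tiggerfy (word : String) (out : String) : Prop := out = tiggerfy_alt word
instance (word : String) (out : String) : Decidable (Spec_tiggerfy word out) := by unfold Spec_tiggerfy; infer_instance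

-- ===== CLAIM (what is proved, stated in full; the proofs are below) =====
def Claim_equal_tiggerfy : Prop := ∀ (word : String), Dom_tiggerfy word → Spec_tiggerfy word (tiggerfy word)

-- ===== LEMMAS AND PROOFS =====

-- Common reference form of both loops: structural recursion on the remaining suffix.
def tigRef : List Char → List Char → List Char
  | [], res => res
  | [c], res => if tigSingle c then res else res ++ [c]
  | c :: d :: l, res =>
    if tigPair c d then tigRef l res
    else if tigSingle c then tigRef (d :: l) res
    else tigRef (d :: l) (res ++ [c])

theorem tiggerfyGo_ref_aux (cs : List Char) :
    ∀ (n i : Nat) (res : List Char), cs.length - i ≤ n →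
      tiggerfyGo cs i res = tigRef (cs.drop i) res := by
  intro n
  induction n with
  | zero =>
    intro i res hn
    rw [tiggerfyGo, dif_neg (by omega), List.drop_eq_nil_of_le (by omega)]
    simp [tigRef]
  | succ n ih =>
    intro i res hn
    by_cases h : i < cs.length
    · have hslice : PySem.List.slice cs (some (i : Int)) (some ((i + 2 : Nat) : Int))
          = (cs.drop i).take 2 := by
        rw [PySem.List.slice_natCast]; congr 1; omega
      rw [List.drop_eq_getElem_cons h] at hslice
      rw [tiggerfyGo, dif_pos h]
      by_cases hpair :
          PySem.Chars.lower (PySem.List.slice cs (some (i : Int)) (some ((i + 2 : Nat) : Int))) = ['g', 'g'] ∨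
          PySem.Chars.lower (PySem.List.slice cs (some (i : Int)) (some ((i + 2 : Nat) : Int))) = ['e', 'r']
      · simp only [if_pos hpair]
        rw [ih (i + 2) res (by omega)]
        cases hl : cs.drop (i + 1) with
        | nil =>
          exfalso
          rw [hl] at hslice
          rw [hslice] at hpair
          simp [PySem.Chars.lower] at hpair
        | cons d l =>
          rw [hl] at hslice
          have hdl : cs.drop (i + 2) = l := by
            have h1 := congrArg (List.drop 1) hl
            rw [List.drop_drop] at h1
            simpa using h1
          have hp : tigPair cs[i] d = true := by
            simp only [tigPair, decide_eq_true_eq]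
            rw [hslice] at hpair
            simpa [PySem.Chars.lower] using hpair
          rw [hdl, List.drop_eq_getElem_cons h, hl]
          simp [tigRef, hp]
      · simp only [if_neg hpair]
        have hp : ∀ d l, cs.drop (i + 1) = d :: l → tigPair cs[i] d = false := by
          intro d l hl
          rw [hl] at hslice
          simp only [tigPair, decide_eq_false_iff_not]
          intro hc
          exact hpair (by rw [hslice]; simpa [PySem.Chars.lower] using hc)
        by_cases hsingle :
            PySem.Chars.lowerChar cs[i] = 't' ∨ PySem.Chars.lowerChar cs[i] = 'i'
        · simp only [if_pos hsingle]
          rw [ih (i + 1) res (by omega), List.drop_eq_getElem_cons h]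
          have hs : tigSingle cs[i] = true := by
            simp only [tigSingle, decide_eq_true_eq]; exact hsingle
          cases hl : cs.drop (i + 1) with
          | nil => simp [tigRef, hs]
          | cons d l => simp [tigRef, hs, hp d l hl]
        · simp only [if_neg hsingle]
          rw [ih (i + 1) (res ++ [cs[i]]) (by omega), List.drop_eq_getElem_cons h]
          have hs : tigSingle cs[i] = false := by
            simp only [tigSingle, decide_eq_false_iff_not]; exact hsingle
          cases hl : cs.drop (i + 1) with
          | nil => simp [tigRef, hs]
          | cons d l => simp [tigRef, hs, hp d l hl]
    · rw [tiggerfyGo, dif_neg h, List.drop_eq_nil_of_le (by omega)]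
      simp [tigRef]

theorem tiggerfyGo_eq_ref (cs : List Char) (i : Nat) (res : List Char) :
    tiggerfyGo cs i res = tigRef (cs.drop i) res :=
  tiggerfyGo_ref_aux cs (cs.length - i) i res le_rfl

theorem tiggerfyAltGo_eq_ref (l : List Char) :
    (∀ p out, tiggerfyAltGo l (some p) out = tigRef (p :: l) out) ∧
    (∀ out, tiggerfyAltGo l none out = tigRef l out) := by
  induction l with
  | nil =>
    constructor
    · intro p out; rw [tiggerfyAltGo, tigRef]
    · intro out; rw [tiggerfyAltGo, tigRef]
  | cons c l ih =>
    constructor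
    · intro p out
      rw [tiggerfyAltGo, tigRef]
      by_cases hp : tigPair p c = true
      · rw [if_pos hp, if_pos hp, ih.2]
      · rw [if_neg hp, if_neg hp, ih.1]
        by_cases hs : tigSingle p = true
        · rw [if_pos hs, if_pos hs]
        · rw [if_neg hs, if_neg hs]
    · intro out
      rw [tiggerfyAltGo, ih.1]

theorem tiggerfy_eq_alt (word : String) : tiggerfy word = tiggerfy_alt word := by
  unfold tiggerfy tiggerfy_alt
  rw [tiggerfyGo_eq_ref, (tiggerfyAltGo_eq_ref word.toList).2, List.drop_zero]

-- ===== VERDICT (by name: the statement is the Claim_ definition above) =====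
theorem tiggerfy_spec : Claim_equal_tiggerfy := by
  intro word _
  unfold Spec_tiggerfy
  exact tiggerfy_eq_alt word
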